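-- pv_equiv track=rewrite | github.com/david-git-2/brandwala-wholesale-quasar-v2 | python/scripts/uk/export_pc_taxonomy.py | collect_unique_values
-- ===== SOURCE A (Python) =====
-- from typing import Any
--
-- def to_text(value: Any) -> str:
--     return str(value if value is not None else "").strip()
--
-- def collect_unique_values(products: list[dict[str, Any]], key: str) -> list[str]:
--     seen: set[str] = set()
--     values: list[str] = []
--     for row in products:
--         value = to_text(row.get(key, ""))
--         if not value:
--             continue
--         normalized = value.casefold()
--         if normalized in seen:
--             continue
--         seen.add(normalized)
--         values.append(value)
--     return sorted(values, key=lambda item: item.casefold())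
-- ===== SOURCE B (Python) =====
-- def collect_unique_values(products, key):
--     values = []
--     for row in products:
--         value = str(row.get(key, "") if row.get(key, "") is not None else "").strip()
--         if value:
--             values.append(value)
--     values.sort(key=str.casefold)
--     out = []
--     prev = None
--     for v in values:
--         cf = v.casefold()
--         if cf != prev:
--             out.append(v)
--             prev = cf
--     return out
-- ===== Notes on version B (the rewrite author's own statement) =====
-- stated objective: alternative
-- what changed: Replaces A's hash-set dedup followed by a sort with: collect all nonempty stripped values, stably sort by casefold, then one adjacent-dedup pass keeping the first of each casefold group.
import Mathlib
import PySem

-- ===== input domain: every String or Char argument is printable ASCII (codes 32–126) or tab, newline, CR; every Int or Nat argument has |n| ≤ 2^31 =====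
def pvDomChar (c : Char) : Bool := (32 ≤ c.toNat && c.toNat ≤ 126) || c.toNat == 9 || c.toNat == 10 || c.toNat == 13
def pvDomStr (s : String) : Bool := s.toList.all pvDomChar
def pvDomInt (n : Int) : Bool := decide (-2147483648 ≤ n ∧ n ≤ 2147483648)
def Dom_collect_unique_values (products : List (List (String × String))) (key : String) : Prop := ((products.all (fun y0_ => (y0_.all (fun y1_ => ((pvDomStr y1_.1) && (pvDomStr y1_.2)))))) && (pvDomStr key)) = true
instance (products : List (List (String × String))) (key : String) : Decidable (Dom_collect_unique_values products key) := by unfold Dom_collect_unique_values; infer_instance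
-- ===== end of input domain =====

-- B collects the nonempty stripped values, stably sorts them by casefold, then removes adjacent
-- equal-casefold entries in one pass, instead of A's hash-set dedup followed by a sort (alternative
-- decomposition, same asymptotic cost). casefold is ported as PySem.Str.lower, exact on the ASCII domain.


-- ===== PORT A =====
def collect_unique_values (products : List (List (String × String))) (key : String) : List String :=
  let st := products.foldl
    (fun (st : PySem.Set String × List String) row =>
      let value := PySem.Str.strip (PySem.Dict.getD ⟨row⟩ key "")
      if value = "" then st
      else
        let normalized := PySem.Str.lower value
        if PySem.Set.contains st.1 normalized then st
        else (PySem.Set.add st.1 normalized, st.2 ++ [value]))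
    (PySem.Set.empty, [])
  PySem.List.sorted st.2 (fun item => PySem.Str.lower item) false

-- ===== PORT B =====
def collect_unique_values_alt (products : List (List (String × String))) (key : String) : List String :=
  let values := products.foldl
    (fun (acc : List String) row =>
      let value := PySem.Str.strip (PySem.Dict.getD ⟨row⟩ key "")
      if value = "" then acc else acc ++ [value]) []
  let sortedValues := PySem.List.sorted values (fun item => PySem.Str.lower item) false
  (sortedValues.foldl
    (fun (st : Option String × List String) v =>
      let cf := PySem.Str.lower v
      if some cf = st.1 then st else (some cf, st.2 ++ [v])) (none, [])).2

-- ===== PRECONDITION & SPEC =====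
def Spec_collect_unique_values (products : List (List (String × String))) (key : String) (out : List String) : Prop := out = collect_unique_values_alt products key
instance (products : List (List (String × String))) (key : String) (out : List String) : Decidable (Spec_collect_unique_values products key out) := by unfold Spec_collect_unique_values; infer_instance

-- ===== CLAIM (what is proved, stated in full; the proofs are below) =====
def Claim_equal_collect_unique_values : Prop := ∀ (products : List (List (String × String))) (key : String), Dom_collect_unique_values products key → Spec_collect_unique_values products key (collect_unique_values products key)

-- ===== LEMMAS AND PROOFS =====

-- the casefold key
def pvKK (v : String) : String := PySem.Str.lower v

-- the list of nonempty stripped values, in product order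
def pvVals (products : List (List (String × String))) (key : String) : List String :=
  (products.map (fun row => PySem.Str.strip (PySem.Dict.getD ⟨row⟩ key ""))).filter (fun v => !(v == ""))

-- A's seen-set dedup, keeping the first value of each casefold key
def pvDed (s : PySem.Set String) : List String → List String
  | [] => []
  | v :: vs =>
      if PySem.Set.contains s (pvKK v) then pvDed s vs
      else v :: pvDed (PySem.Set.add s (pvKK v)) vs

-- B's adjacent dedup, as a recursion with the previous kept key as state
def pvAdj (p : Option String) : List String → List String
  | [] => []
  | v :: vs =>
      if some (pvKK v) = p then pvAdj p vs else v :: pvAdj (some (pvKK v)) vs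

-- A's product loop computes pvDed over pvVals
theorem pvA_loop (products : List (List (String × String))) (key : String) :
    ∀ (s : PySem.Set String) (w : List String),
      (products.foldl
        (fun (st : PySem.Set String × List String) row =>
          let value := PySem.Str.strip (PySem.Dict.getD ⟨row⟩ key "")
          if value = "" then st
          else
            let normalized := PySem.Str.lower value
            if PySem.Set.contains st.1 normalized then st
            else (PySem.Set.add st.1 normalized, st.2 ++ [value]))
        (s, w)).2 = w ++ pvDed s (pvVals products key) := by
  induction products with
  | nil => intro s w; simp [pvVals, pvDed]
  | cons row rest ih =>
      intro s w
      by_cases h : PySem.Str.strip (PySem.Dict.getD ⟨row⟩ key "") = ""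
      · simpa [h, pvVals, pvDed] using ih s w
      · by_cases hm : PySem.Str.lower (PySem.Str.strip (PySem.Dict.getD ⟨row⟩ key "")) ∈ s
        · simpa [h, hm, pvVals, pvDed, pvKK, PySem.Set.contains, List.contains_iff_mem] using ih s w
        · simpa [h, hm, pvVals, pvDed, pvKK, PySem.Set.contains, List.contains_iff_mem] using
            ih (PySem.Set.add s (PySem.Str.lower (PySem.Str.strip (PySem.Dict.getD ⟨row⟩ key "")))) (w ++ [PySem.Str.strip (PySem.Dict.getD ⟨row⟩ key "")])

-- B's collection loop computes pvVals
theorem pvB_loop (products : List (List (String × String))) (key : String) :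
    ∀ (w : List String),
      products.foldl
        (fun (acc : List String) row =>
          let value := PySem.Str.strip (PySem.Dict.getD ⟨row⟩ key "")
          if value = "" then acc else acc ++ [value]) w = w ++ pvVals products key := by
  induction products with
  | nil => intro w; simp [pvVals]
  | cons row rest ih =>
      intro w
      by_cases h : PySem.Str.strip (PySem.Dict.getD ⟨row⟩ key "") = ""
      · simpa [h, pvVals] using ih w
      · simpa [h, pvVals] using ih (w ++ [PySem.Str.strip (PySem.Dict.getD ⟨row⟩ key "")])

-- B's dedup loop computes pvAdj
theorem pvB_dedup_loop (l : List String) :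
    ∀ (p : Option String) (out : List String),
      (l.foldl
        (fun (st : Option String × List String) v =>
          let cf := PySem.Str.lower v
          if some cf = st.1 then st else (some cf, st.2 ++ [v])) (p, out)).2 = out ++ pvAdj p l := by
  induction l with
  | nil => intro p out; simp [pvAdj]
  | cons v vs ih =>
      intro p out
      by_cases h : some (PySem.Str.lower v) = p
      · simpa [h, pvAdj, pvKK] using ih p out
      · simpa [h, pvAdj, pvKK] using ih (some (PySem.Str.lower v)) (out ++ [v])

-- appending one value to pvDed's input
theorem pvDed_append (x : String) (vs : List String) :
    ∀ (s : PySem.Set String),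
      pvDed s (vs ++ [x]) =
        pvDed s vs ++ (if pvKK x ∈ (s : List String) ∨ pvKK x ∈ vs.map pvKK then [] else [x]) := by
  induction vs with
  | nil =>
      intro s
      by_cases h : pvKK x ∈ (s : List String) <;>
        simp [pvDed, PySem.Set.contains, List.contains_iff_mem, h]
  | cons v rest ih =>
      intro s
      simp only [List.cons_append, pvDed]
      by_cases hv : PySem.Set.contains s (pvKK v) = true
      · have hv' : pvKK v ∈ (s : List String) := by
          simpa [PySem.Set.contains, List.contains_iff_mem] using hv
        rw [if_pos hv, if_pos hv, ih s]
        congr 1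
        by_cases hc : pvKK x ∈ (s : List String) ∨ pvKK x ∈ rest.map pvKK
        · rw [if_pos hc, if_pos ?_]
          rcases hc with h | h
          · exact Or.inl h
          · exact Or.inr (by simp [h])
        · rw [if_neg hc, if_neg ?_]
          rintro (h | h)
          · exact hc (Or.inl h)
          · simp only [List.map_cons, List.mem_cons] at h
            rcases h with h | h
            · exact hc (Or.inl (h ▸ hv'))
            · exact hc (Or.inr h)
      · rw [if_neg hv, if_neg hv, ih (PySem.Set.add s (pvKK v))]
        simp only [List.cons_append, List.append_assoc]
        congr 2
        have hmem : pvKK x ∈ (PySem.Set.add s (pvKK v) : List String) ↔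
            pvKK x ∈ (s : List String) ∨ pvKK x = pvKK v :=
          PySem.Set.mem_add s (pvKK v) (pvKK x)
        by_cases hc : pvKK x ∈ (s : List String) ∨ pvKK x ∈ (v :: rest).map pvKK
        · rw [if_pos hc, if_pos ?_]
          rcases hc with h | h
          · exact Or.inl (hmem.mpr (Or.inl h))
          · simp only [List.map_cons, List.mem_cons] at h
            rcases h with h | h
            · exact Or.inl (hmem.mpr (Or.inr h))
            · exact Or.inr h
        · rw [if_neg hc, if_neg ?_]
          rintro (h | h)
          · rcases hmem.mp h with h | h
            · exact hc (Or.inl h)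
            · exact hc (Or.inr (by simp [h]))
          · exact hc (Or.inr (by simp only [List.map_cons, List.mem_cons]; exact Or.inr h))

-- sorted of an appended element is an insertion into the sorted list
theorem pvSorted_append (ys : List String) (x : String) :
    PySem.List.sorted (ys ++ [x]) pvKK false =
      PySem.List.insertBy (fun a b => decide (pvKK a < pvKK b)) x (PySem.List.sorted ys pvKK false) := by
  rw [PySem.List.sorted_eq_foldl_insertBy, PySem.List.sorted_eq_foldl_insertBy, List.foldl_append]
  rfl

-- the core exchange: adjacent dedup after a stable insertion
theorem pvAdj_insertBy (x : String) (t : List String) :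
    ∀ (p : Option String),
      t.Pairwise (fun a b => pvKK a ≤ pvKK b) →
      (∀ c, p = some c → c ≤ pvKK x ∧ ∀ y ∈ t, c ≤ pvKK y) →
      pvAdj p (PySem.List.insertBy (fun a b => decide (pvKK a < pvKK b)) x t) =
        if p = some (pvKK x) ∨ pvKK x ∈ t.map pvKK then pvAdj p t
        else PySem.List.insertBy (fun a b => decide (pvKK a < pvKK b)) x (pvAdj p t) := by
  induction t with
  | nil =>
      intro p _ _
      by_cases h : p = some (pvKK x) <;> simp [PySem.List.insertBy, pvAdj, h, eq_comm]
  | cons y ys ih =>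
      intro p hsort hp
      have hys : ys.Pairwise (fun a b => pvKK a ≤ pvKK b) := hsort.tail
      have hy_le : ∀ z ∈ ys, pvKK y ≤ pvKK z := by
        intro z hz; exact List.rel_of_pairwise_cons hsort hz
      by_cases hlt : pvKK x < pvKK y
      · -- x is inserted in front
        have hins : PySem.List.insertBy (fun a b => decide (pvKK a < pvKK b)) x (y :: ys) = x :: y :: ys := by
          simp [PySem.List.insertBy, hlt]
        rw [hins]
        by_cases hpx : p = some (pvKK x)
        · -- x is swallowed by the previous key; it is also ≤ every key here, so the cond is true
          rw [if_pos (Or.inl hpx)]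
          simp [pvAdj, hpx]
        · have hfresh : pvKK x ∉ (y :: ys).map pvKK := by
            simp only [List.map_cons, List.mem_cons]
            rintro (h | h)
            · exact absurd h (ne_of_lt hlt)
            · rcases List.mem_map.mp h with ⟨z, hz, hzk⟩
              exact absurd hzk.symm (ne_of_lt (lt_of_lt_of_le hlt (hy_le z hz)))
          rw [if_neg (by rintro (h | h); exact hpx h; exact hfresh h)]
          have hpy : p ≠ some (pvKK y) := by
            rintro rfl
            rcases hp (pvKK y) rfl with ⟨hle, _⟩
            exact absurd hlt (not_lt.mpr hle)
          have hpx2 : ¬ (some (pvKK x) = p) := fun h => hpx h.symm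
          have hpy2 : ¬ (some (pvKK y) = p) := fun h => hpy h.symm
          have hyx2 : ¬ (some (pvKK y) = some (pvKK x)) := by
            simpa using (ne_of_lt hlt).symm
          simp only [pvAdj, if_neg hpx2, if_neg hpy2, if_neg hyx2]
          simp [PySem.List.insertBy, hlt]
      · -- x goes past y
        have hyx : pvKK y ≤ pvKK x := not_lt.mp hlt
        have hins : PySem.List.insertBy (fun a b => decide (pvKK a < pvKK b)) x (y :: ys) =
            y :: PySem.List.insertBy (fun a b => decide (pvKK a < pvKK b)) x ys := by
          simp [PySem.List.insertBy, hlt]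
        rw [hins]
        by_cases hpy : p = some (pvKK y)
        · -- y is swallowed too; recurse with the same p
          have hrec := ih p hys (by
            intro c hc
            rcases hp c hc with ⟨h1, h2⟩
            exact ⟨h1, fun z hz => h2 z (List.mem_cons_of_mem y hz)⟩)
          simp only [pvAdj, if_pos hpy, hrec]
          have hcond : (p = some (pvKK x) ∨ pvKK x ∈ ys.map pvKK) ↔
              (p = some (pvKK x) ∨ pvKK x ∈ (y :: ys).map pvKK) := by
            constructor
            · rintro (h | h)
              · exact Or.inl h
              · exact Or.inr (by simp only [List.map_cons, List.mem_cons]; exact Or.inr h)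
            · rintro (h | h)
              · exact Or.inl h
              · simp only [List.map_cons, List.mem_cons] at h
                rcases h with h | h
                · exact Or.inl (by rw [hpy, h])
                · exact Or.inr h
          have hpy2 : some (pvKK y) = p := hpy.symm
          by_cases hc : p = some (pvKK x) ∨ pvKK x ∈ ys.map pvKK
          · rw [if_pos hc, if_pos (hcond.mp hc)]
            rw [if_pos hpy2, if_pos hpy2]
          · rw [if_neg hc, if_neg (fun h => hc (hcond.mpr h))]
            rw [if_pos hpy2, if_pos hpy2]
        · -- y is kept; recurse with p = some (pvKK y)
          have hpx : p ≠ some (pvKK x) := by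
            rintro rfl
            rcases hp (pvKK x) rfl with ⟨_, h2⟩
            have := h2 y (List.mem_cons_self)
            exact hpy (congrArg some (le_antisymm this hyx).symm ▸ rfl)
          have hrec := ih (some (pvKK y)) hys (by
            rintro c hc
            injection hc with hc; subst hc
            exact ⟨hyx, hy_le⟩)
          simp only [pvAdj, if_neg hpy, hrec]
          have hcond : (some (pvKK y) = some (pvKK x) ∨ pvKK x ∈ ys.map pvKK) ↔
              (p = some (pvKK x) ∨ pvKK x ∈ (y :: ys).map pvKK) := by
            constructor
            · rintro (h | h)
              · injection h with h
                exact Or.inr (by simp only [List.map_cons, List.mem_cons]; exact Or.inl h.symm)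
              · exact Or.inr (by simp only [List.map_cons, List.mem_cons]; exact Or.inr h)
            · rintro (h | h)
              · exact absurd h hpx
              · simp only [List.map_cons, List.mem_cons] at h
                rcases h with h | h
                · exact Or.inl (congrArg some h.symm)
                · exact Or.inr h
          have hpy2 : ¬ (some (pvKK y) = p) := fun h => hpy h.symm
          by_cases hc : some (pvKK y) = some (pvKK x) ∨ pvKK x ∈ ys.map pvKK
          · rw [if_pos hc, if_pos (hcond.mp hc)]
            rw [if_neg hpy2, if_neg hpy2]
          · rw [if_neg hc, if_neg (fun h => hc (hcond.mpr h))]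
            rw [if_neg hpy2, if_neg hpy2]
            simp [PySem.List.insertBy, hlt]

-- main: sorting A's deduped list equals adjacent-deduping B's sorted list
theorem pvMain (vs : List String) :
    PySem.List.sorted (pvDed PySem.Set.empty vs) pvKK false =
      pvAdj none (PySem.List.sorted vs pvKK false) := by
  induction vs using List.reverseRecOn with
  | nil => rfl
  | append_singleton vs x ih =>
      have hA1 := pvAdj_insertBy x (PySem.List.sorted vs pvKK false) none
        (PySem.List.sorted_pairwise vs pvKK) (by rintro c ⟨⟩)
      have hmem_sorted : pvKK x ∈ (PySem.List.sorted vs pvKK false).map pvKK ↔ pvKK x ∈ vs.map pvKK := by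
        constructor <;> intro h <;> rcases List.mem_map.mp h with ⟨z, hz, hzk⟩
        · exact List.mem_map.mpr ⟨z, (PySem.List.mem_sorted vs pvKK false z).mp hz, hzk⟩
        · exact List.mem_map.mpr ⟨z, (PySem.List.mem_sorted vs pvKK false z).mpr hz, hzk⟩
      rw [pvDed_append x vs PySem.Set.empty, pvSorted_append vs x, hA1]
      by_cases hc : pvKK x ∈ vs.map pvKK
      · rw [if_pos (by simp [hc]), if_pos (Or.inr (hmem_sorted.mpr hc))]
        simpa using ih
      · rw [if_neg (by simp [hc]),
            if_neg (fun hcontra => by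
              rcases hcontra with h | h
              · simp at h
              · exact hc (hmem_sorted.mp h))]
        rw [pvSorted_append, ih]

-- ===== VERDICT (by name: the statement is the Claim_ definition above) =====
theorem collect_unique_values_spec : Claim_equal_collect_unique_values := by
  intro products key _
  unfold Spec_collect_unique_values collect_unique_values collect_unique_values_alt
  simp only [pvA_loop products key PySem.Set.empty [], pvB_loop products key [],
    pvB_dedup_loop, List.nil_append]
  exact pvMain (pvVals products key)
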